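-- pv_equiv track=rewrite | github.com/toanh-and-friends/TTCSCN | services/east_detect/cut_image.py | find_max_min_x_y
-- ===== SOURCE A (Python) =====
-- def find_max_min_x_y(array):
--     max_x = array[0]
--     max_y = array[1]
--     min_x = array[0]
--     min_y = array[1]
--     for i in range(0, len(array)):
--         if i % 2 == 0:
--             if max_x < array[i]:
--                 max_x = array[i]
--             if min_x > array[i]:
--                 min_x = array[i]
--         else:
--             if max_y < array[i]:
--                 max_y = array[i]
--             if min_y > array[i]:
--                 min_y = array[i]
--     return {
--         "min_x": min_x,
--         "max_x": max_x,
--         "min_y": min_y,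
--         "max_y": max_y
--     }
-- ===== SOURCE B (Python) =====
-- def find_max_min_x_y(array):
--     xs = [v for i, v in enumerate(array) if i % 2 == 0]
--     ys = [v for i, v in enumerate(array) if i % 2 == 1]
--     return {"min_x": min(xs), "max_x": max(xs), "min_y": min(ys), "max_y": max(ys)}
-- ===== Notes on version B (the rewrite author's own statement) =====
-- stated objective: simpler
-- what changed: Replaces the single pass with four running accumulators and a parity branch by splitting the list into even- and odd-indexed values and taking min/max of each with the builtins.
import Mathlib
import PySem

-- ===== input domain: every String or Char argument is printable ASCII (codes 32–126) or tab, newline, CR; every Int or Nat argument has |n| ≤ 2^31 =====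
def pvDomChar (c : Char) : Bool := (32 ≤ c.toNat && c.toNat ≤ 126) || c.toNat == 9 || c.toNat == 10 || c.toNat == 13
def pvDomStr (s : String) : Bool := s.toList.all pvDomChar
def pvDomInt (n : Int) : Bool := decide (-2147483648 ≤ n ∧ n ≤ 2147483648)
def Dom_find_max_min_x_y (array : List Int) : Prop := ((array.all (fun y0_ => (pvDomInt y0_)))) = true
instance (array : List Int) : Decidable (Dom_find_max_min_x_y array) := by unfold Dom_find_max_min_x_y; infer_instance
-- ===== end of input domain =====

-- B splits the list into even- and odd-indexed values and takes min/max of each,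
-- instead of A's single pass with four accumulators and a parity branch (objective: simpler).

-- ===== PORT A =====
-- the body of A's for-loop over i in range(0, len(array)); state = (max_x, max_y, min_x, min_y)
def pvStepA (array : List Int) (s : Int × Int × Int × Int) (i : Int) : Int × Int × Int × Int :=
  if i % 2 == 0 then
    (if s.1 < PySem.List.pyGetD array i 0 then PySem.List.pyGetD array i 0 else s.1,
     s.2.1,
     if s.2.2.1 > PySem.List.pyGetD array i 0 then PySem.List.pyGetD array i 0 else s.2.2.1,
     s.2.2.2)
  else
    (s.1,
     if s.2.1 < PySem.List.pyGetD array i 0 then PySem.List.pyGetD array i 0 else s.2.1,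
     s.2.2.1,
     if s.2.2.2 > PySem.List.pyGetD array i 0 then PySem.List.pyGetD array i 0 else s.2.2.2)

def find_max_min_x_y (array : List Int) : List (String × Int) :=
  let max_x := PySem.List.pyGetD array 0 0
  let max_y := PySem.List.pyGetD array 1 0
  let min_x := PySem.List.pyGetD array 0 0
  let min_y := PySem.List.pyGetD array 1 0
  let s := List.foldl (pvStepA array) (max_x, max_y, min_x, min_y)
      (PySem.List.pyRange 0 (PySem.List.len array) 1)
  [("min_x", s.2.2.1), ("max_x", s.1), ("min_y", s.2.2.2), ("max_y", s.2.1)]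

-- ===== PORT B =====
def find_max_min_x_y_alt (array : List Int) : List (String × Int) :=
  let xs := ((PySem.List.enumerate array).filter (fun p => p.1 % 2 == 0)).map Prod.snd
  let ys := ((PySem.List.enumerate array).filter (fun p => p.1 % 2 == 1)).map Prod.snd
  [("min_x", (PySem.List.min? xs (fun v => v)).getD 0),
   ("max_x", (PySem.List.max? xs (fun v => v)).getD 0),
   ("min_y", (PySem.List.min? ys (fun v => v)).getD 0),
   ("max_y", (PySem.List.max? ys (fun v => v)).getD 0)]

-- ===== PRECONDITION & SPEC =====
-- A raises IndexError on lists of length < 2 (array[1] in its prologue); B raises ValueError there too (min of an empty slice).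
def Pre_find_max_min_x_y (array : List Int) : Prop := 2 ≤ array.length
instance (array : List Int) : Decidable (Pre_find_max_min_x_y array) := by unfold Pre_find_max_min_x_y; infer_instance
def pvWitness_find_max_min_x_y : List Int := [3, -1, 7, 2]
def Spec_find_max_min_x_y (array : List Int) (out : List (String × Int)) : Prop := out = find_max_min_x_y_alt array
instance (array : List Int) (out : List (String × Int)) : Decidable (Spec_find_max_min_x_y array out) := by unfold Spec_find_max_min_x_y; infer_instance

-- ===== CLAIM (what is proved, stated in full; the proofs are below) =====
def Claim_equal_find_max_min_x_y : Prop := ∀ (array : List Int), Dom_find_max_min_x_y array → Pre_find_max_min_x_y array → Spec_find_max_min_x_y array (find_max_min_x_y array)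

-- ===== LEMMAS AND PROOFS =====
mutual
def pvEvens : List Int → List Int
  | [] => []
  | x :: t => x :: pvOdds t
def pvOdds : List Int → List Int
  | [] => []
  | _ :: t => pvEvens t
end

theorem pv_if_max (a b : Int) : (if a < b then b else a) = max a b := by
  split_ifs with h <;> omega

theorem pv_if_min (a b : Int) : (if a > b then b else a) = min a b := by
  split_ifs with h <;> omega

theorem pv_enum_filter (l : List Int) : ∀ a : Int,
    ((((PySem.List.enumerate l a).filter (fun p => p.1 % 2 == 0)).map Prod.snd
        = if a % 2 = 0 then pvEvens l else pvOdds l)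
     ∧ (((PySem.List.enumerate l a).filter (fun p => p.1 % 2 == 1)).map Prod.snd
        = if a % 2 = 0 then pvOdds l else pvEvens l)) := by
  induction l with
  | nil => intro a; simp [PySem.List.enumerate, pvEvens, pvOdds]
  | cons x t ih =>
    intro a
    have ih' := ih (a + 1)
    obtain ⟨e1, e2⟩ := ih'
    by_cases h : a % 2 = 0
    · rw [if_neg (by omega : ¬ (a + 1) % 2 = 0)] at e1 e2
      constructor <;> simp [PySem.List.enumerate, pvEvens, pvOdds, h, e1, e2]
    · rw [if_pos (by omega : (a + 1) % 2 = 0)] at e1 e2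
      have h1 : a % 2 = 1 := by omega
      constructor <;> simp [PySem.List.enumerate, pvEvens, pvOdds, h1, e1, e2]

theorem pv_foldA : ∀ (t pre : List Int) (mx my nx ny : Int),
    List.foldl (pvStepA (pre ++ t)) (mx, my, nx, ny)
        (PySem.List.pyRange (pre.length : Int) ((pre.length : Int) + (t.length : Int)) 1)
      = if (pre.length : Int) % 2 = 0 then
          (List.foldl max mx (pvEvens t), List.foldl max my (pvOdds t),
           List.foldl min nx (pvEvens t), List.foldl min ny (pvOdds t))
        else
          (List.foldl max mx (pvOdds t), List.foldl max my (pvEvens t),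
           List.foldl min nx (pvOdds t), List.foldl min ny (pvEvens t)) := by
  intro t
  induction t with
  | nil =>
    intro pre mx my nx ny
    rw [show ((([] : List Int).length : Nat) : Int) = 0 from rfl, add_zero,
        PySem.List.pyRange_one_eq_nil (le_refl _)]
    simp [pvEvens, pvOdds]
  | cons v t' ih =>
    intro pre mx my nx ny
    rw [PySem.List.pyRange_one_cons (by simp)]
    have hget : PySem.List.pyGetD (pre ++ v :: t') (pre.length : Int) 0 = v := by
      rw [PySem.List.pyGetD_natCast]
      simp [List.getD]
    have hstep : pvStepA (pre ++ v :: t') (mx, my, nx, ny) (pre.length : Int)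
        = if (pre.length : Int) % 2 = 0 then (max mx v, my, min nx v, ny)
          else (mx, max my v, nx, min ny v) := by
      by_cases h : (pre.length : Int) % 2 = 0 <;>
        simp [pvStepA, hget, pv_if_max, pv_if_min, h]
    have harg : ((pre.length : Int) + ((v :: t').length : Nat)) = ((pre ++ [v]).length : Int) + (t'.length : Int) := by
      simp; ring
    have hpre : pre ++ v :: t' = (pre ++ [v]) ++ t' := by simp
    by_cases h : (pre.length : Int) % 2 = 0
    · have hx := ih (pre ++ [v]) (max mx v) my (min nx v) ny
      rw [if_neg (by simp; omega : ¬ (((pre ++ [v]).length : Nat) : Int) % 2 = 0)] at hx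
      rw [List.foldl_cons, hstep, if_pos h, if_pos h]
      rw [show ((pre.length : Int) + 1) = (((pre ++ [v]).length : Nat) : Int) from by simp]
      rw [harg, hpre, hx]
      simp [pvEvens, pvOdds]
    · have hx := ih (pre ++ [v]) mx (max my v) nx (min ny v)
      rw [if_pos (by simp; omega : (((pre ++ [v]).length : Nat) : Int) % 2 = 0)] at hx
      rw [List.foldl_cons, hstep, if_neg h, if_neg h]
      rw [show ((pre.length : Int) + 1) = (((pre ++ [v]).length : Nat) : Int) from by simp]
      rw [harg, hpre, hx]
      simp [pvEvens, pvOdds]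

-- ===== VERDICT (by name: the statement is the Claim_ definition above) =====
theorem find_max_min_x_y_spec : Claim_equal_find_max_min_x_y := by
  intro array _ hpre
  unfold Pre_find_max_min_x_y at hpre
  unfold Spec_find_max_min_x_y
  match array, hpre with
  | x :: y :: t, _ =>
    have hA := pv_foldA (x :: y :: t) [] x y x y
    have hE := pv_enum_filter (x :: y :: t) 0
    rw [if_pos (by decide)] at hA
    rw [if_pos (by decide)] at hE
    simp only [List.length_nil, Nat.cast_zero, zero_add, List.nil_append] at hA
    simp only [find_max_min_x_y, find_max_min_x_y_alt, PySem.List.len]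
    rw [hE.1, hE.2]
    simp only [PySem.List.pyGetD_zero_cons,
      show PySem.List.pyGetD (x :: y :: t) 1 0 = y from by
        rw [show (1 : Int) = ((1 : Nat) : Int) from rfl, PySem.List.pyGetD_natCast]; rfl]
    rw [hA]
    simp [pvEvens, pvOdds, PySem.List.min?_id_cons, PySem.List.max?_id_cons,
      min_self, max_self]
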